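-- pv_equiv track=rewrite | github.com/pypi-data/pypi-mirror-267 | packages/cronvisio/cronvisio-0.9.0.tar.gz/cronvisio-0.9.0/src/cronvisio/monitor/amazon_kindle_quotes.py | extract_quote
-- ===== SOURCE A (Python) =====
-- def extract_quote(text):
--     """
--     Extract the quote from the given text.
--
--     Note:
--         The Kindle puts the quote text under quotation marks.
--     """
--     result = []
--     in_quote = False
--     for line in text.split("\n"):
--         if line.startswith('"'):
--             in_quote = True
--         elif in_quote and not line.strip():
--             in_quote = False
--
--         if in_quote:
--             result.append(line.strip())
--
--     return " ".join(result)
-- ===== SOURCE B (Python) =====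
-- def _quote_suffix(para):
--     # stripped lines from the first line that starts with '"' to the end of the paragraph
--     for i, line in enumerate(para):
--         if line.startswith('"'):
--             return [l.strip() for l in para[i:]]
--     return []
--
--
-- def extract_quote(text):
--     """Extract the quote from the given text (paragraph-wise decomposition)."""
--     parts = []
--     para = []
--     for line in text.split("\n"):
--         if line.strip():
--             para.append(line)
--         else:
--             if para:
--                 parts.extend(_quote_suffix(para))
--             para = []
--     if para:
--         parts.extend(_quote_suffix(para))
--     return " ".join(parts)
-- ===== Notes on version B (the rewrite author's own statement) =====
-- stated objective: alternative
-- what changed: Replaces the persistent in_quote flag threaded through a single line loop by an explicit paragraph decomposition: lines are buffered into blank-separated paragraphs and each finished paragraph contributes the stripped suffix from its first raw quote-starting line.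
import Mathlib
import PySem

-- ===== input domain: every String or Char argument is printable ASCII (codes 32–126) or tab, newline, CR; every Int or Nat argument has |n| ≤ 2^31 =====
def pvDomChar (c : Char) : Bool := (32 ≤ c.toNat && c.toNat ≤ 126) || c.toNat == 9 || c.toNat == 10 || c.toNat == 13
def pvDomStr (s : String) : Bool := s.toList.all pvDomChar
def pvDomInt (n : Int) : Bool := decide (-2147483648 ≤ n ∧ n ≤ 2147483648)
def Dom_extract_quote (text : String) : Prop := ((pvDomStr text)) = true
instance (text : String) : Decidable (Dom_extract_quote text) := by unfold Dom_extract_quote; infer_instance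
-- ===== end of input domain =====

-- B replaces A's persistent in_quote flag with an explicit paragraph-buffer decomposition; same cost, proved equal everywhere.


-- ===== PORT A =====
-- loop 'for line in lines' with state (result, in_quote); branch order as in A
def extract_quote (text : String) : String :=
  let lines := (PySem.Str.split? text "\n").getD []   -- sep is the nonempty literal "\n", so split? is always some
  let st := lines.foldl (fun (st : List String × Bool) line =>
    let inq :=
      if PySem.Str.startswith line "\"" then true
      else if st.2 && (PySem.Str.strip line == "") then false
      else st.2
    (if inq then st.1 ++ [PySem.Str.strip line] else st.1, inq)) ([], false)
  PySem.Str.join " " st.1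

-- ===== PORT B =====
-- helper _quote_suffix: scan for the first raw quote-starting line, strip the suffix
def quoteSuffix : List String → List String
  | [] => []
  | l :: ls =>
    if PySem.Str.startswith l "\"" then (l :: ls).map PySem.Str.strip
    else quoteSuffix ls

-- loop with state (parts, para); a blank line flushes the buffered paragraph
def extract_quote_alt (text : String) : String :=
  let lines := (PySem.Str.split? text "\n").getD []
  let st := lines.foldl (fun (st : List String × List String) line =>
    if PySem.Str.strip line == "" then
      ((if st.2.isEmpty then st.1 else st.1 ++ quoteSuffix st.2), [])
    else (st.1, st.2 ++ [line])) ([], [])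
  PySem.Str.join " " (if st.2.isEmpty then st.1 else st.1 ++ quoteSuffix st.2)

-- ===== PRECONDITION & SPEC =====
def Spec_extract_quote (text : String) (out : String) : Prop := out = extract_quote_alt text
instance (text : String) (out : String) : Decidable (Spec_extract_quote text out) := by unfold Spec_extract_quote; infer_instance

-- ===== CLAIM (what is proved, stated in full; the proofs are below) =====
def Claim_equal_extract_quote : Prop := ∀ (text : String), Dom_extract_quote text → Spec_extract_quote text (extract_quote text)

-- ===== LEMMAS AND PROOFS =====

-- the three concrete ingredients of both loops
def qf : String → Bool := fun l => PySem.Str.startswith l "\""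
def blf : String → Bool := fun l => PySem.Str.strip l == ""
def spf : String → String := fun l => PySem.Str.strip l

-- A's loop step and its recursive reading, generic in the quote test q, blank test bl and strip sp
def fAg (q bl : String → Bool) (sp : String → String) :
    List String × Bool → String → List String × Bool :=
  fun st line =>
    let inq := if q line then true else if st.2 && bl line then false else st.2
    (if inq then st.1 ++ [sp line] else st.1, inq)

def loopAg (q bl : String → Bool) (sp : String → String) : List String → Bool → List String
  | [], _ => []
  | l :: ls, b =>
    let b' := if q l then true else if b && bl l then false else b
    (if b' then [sp l] else []) ++ loopAg q bl sp ls b'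

-- B's loop step and its recursive (flushed) reading, generic in bl and the paragraph handler qs
def fBg (bl : String → Bool) (qs : List String → List String) :
    List String × List String → String → List String × List String :=
  fun st line =>
    if bl line then ((if st.2.isEmpty then st.1 else st.1 ++ qs st.2), [])
    else (st.1, st.2 ++ [line])

def loopBg (bl : String → Bool) (qs : List String → List String) :
    List String → List String → List String
  | [], cur => if cur.isEmpty then [] else qs cur
  | l :: ls, cur =>
    if bl l then (if cur.isEmpty then [] else qs cur) ++ loopBg bl qs ls []
    else loopBg bl qs ls (cur ++ [l])

lemma foldA_g (q bl : String → Bool) (sp : String → String) (ls : List String) :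
    ∀ res b, (ls.foldl (fAg q bl sp) (res, b)).1 = res ++ loopAg q bl sp ls b := by
  induction ls with
  | nil => intro res b; simp [loopAg]
  | cons l ls ih =>
    intro res b
    rw [List.foldl_cons,
      show fAg q bl sp (res, b) l =
        ((if (if q l then true else if b && bl l then false else b) then res ++ [sp l] else res),
          (if q l then true else if b && bl l then false else b)) from rfl]
    cases hq : q l <;> cases hb2 : b <;> cases hbl : bl l <;>
      simp [hq, hb2, hbl, ih, loopAg]

lemma foldB_g (bl : String → Bool) (qs : List String → List String) (ls : List String) :
    ∀ res cur,
    (if ((ls.foldl (fBg bl qs) (res, cur)).2).isEmpty then (ls.foldl (fBg bl qs) (res, cur)).1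
     else (ls.foldl (fBg bl qs) (res, cur)).1 ++ qs ((ls.foldl (fBg bl qs) (res, cur)).2))
      = res ++ loopBg bl qs ls cur := by
  induction ls with
  | nil => intro res cur; cases cur <;> simp [loopBg]
  | cons l ls ih =>
    intro res cur
    rw [List.foldl_cons,
      show fBg bl qs (res, cur) l =
        (if bl l then ((if cur.isEmpty then res else res ++ qs cur), ([] : List String))
         else (res, cur ++ [l])) from rfl]
    cases hbl : bl l
    · simp only [Bool.false_eq_true, if_false]
      rw [ih]
      simp [loopBg, hbl]
    · simp only [if_true]
      rw [ih]
      cases cur <;> simp [loopBg, hbl]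

-- the bridge, generic: B's paragraph-buffer loop computes A's flag loop
lemma loopB_eq_loopA_g (q bl : String → Bool) (sp : String → String)
    (qs : List String → List String)
    (hqb : ∀ l, q l = true → bl l = false)
    (hqs0 : qs [] = [])
    (hqsapp : ∀ cur l, qs (cur ++ [l]) = qs cur ++ (if cur.any q || q l then [sp l] else []))
    (ls : List String) :
    ∀ cur, loopBg bl qs ls cur = qs cur ++ loopAg q bl sp ls (cur.any q) := by
  induction ls with
  | nil => intro cur; cases cur <;> simp [loopBg, loopAg, hqs0]
  | cons l ls ih =>
    intro cur
    cases hbl : bl l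
    · rw [show loopBg bl qs (l :: ls) cur =
          (if bl l then (if cur.isEmpty then [] else qs cur) ++ loopBg bl qs ls []
           else loopBg bl qs ls (cur ++ [l])) from rfl, hbl]
      simp only [Bool.false_eq_true, if_false]
      rw [ih, hqsapp]
      cases hq : q l <;> cases hany : cur.any q <;>
        simp [loopAg, hq, hany, hbl]
    · have hq : q l = false := by
        cases h : q l
        · rfl
        · rw [hqb l h] at hbl; exact absurd hbl (by simp)
      rw [show loopBg bl qs (l :: ls) cur =
          (if bl l then (if cur.isEmpty then [] else qs cur) ++ loopBg bl qs ls []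
           else loopBg bl qs ls (cur ++ [l])) from rfl, hbl]
      simp only [if_true]
      rw [ih, hqs0]
      cases hany : cur.any q <;> cases cur <;>
        simp_all [loopAg, hq, hbl]

-- a line that starts with '"' does not strip to "" (so a quote-start line is never blank)
lemma hqb_conc : ∀ l, qf l = true → blf l = false := by
  intro l h
  have h' : PySem.Chars.startswith l.toList ['"'] = true := by
    simpa [qf] using h
  rw [PySem.Chars.startswith_iff] at h'
  obtain ⟨t, ht⟩ := h'
  show (PySem.Str.strip l == "") = false
  apply beq_false_of_ne
  intro hcontra
  have h0 : (PySem.Str.strip l).toList = ([] : List Char) := by rw [hcontra]; rfl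
  rw [PySem.Str.toList_strip, ← ht] at h0
  simp [PySem.Chars.strip, PySem.Chars.lstrip, PySem.Chars.rstrip,
    PySem.Chars.isspace] at h0
  exact absurd (h0 '"' (Or.inr rfl)) (by decide)

-- appending a line to the paragraph buffer extends quoteSuffix by one stripped line (or starts it)
lemma qs_append_conc : ∀ cur l,
    quoteSuffix (cur ++ [l]) =
      quoteSuffix cur ++ (if cur.any qf || qf l then [spf l] else []) := by
  intro cur l
  induction cur with
  | nil =>
    cases hq : PySem.Chars.startswith l.toList ['"'] <;>
      simp [quoteSuffix, qf, spf, hq]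
  | cons c cs ih =>
    cases hq : PySem.Chars.startswith c.toList ['"'] <;>
      simp [quoteSuffix, qf, spf, hq, ih, or_assoc]

-- ===== VERDICT (by name: the statement is the Claim_ definition above) =====
theorem extract_quote_spec : Claim_equal_extract_quote := by
  intro text _
  unfold Spec_extract_quote extract_quote extract_quote_alt
  dsimp only
  rw [show (fun (st : List String × Bool) line =>
      let inq :=
        if PySem.Str.startswith line "\"" then true
        else if st.2 && (PySem.Str.strip line == "") then false
        else st.2
      (if inq then st.1 ++ [PySem.Str.strip line] else st.1, inq)) = fAg qf blf spf from rfl,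
    show (fun (st : List String × List String) line =>
      if PySem.Str.strip line == "" then
        ((if st.2.isEmpty then st.1 else st.1 ++ quoteSuffix st.2), [])
      else (st.1, st.2 ++ [line])) = fBg blf quoteSuffix from rfl]
  rw [foldA_g, foldB_g,
    loopB_eq_loopA_g qf blf spf quoteSuffix hqb_conc rfl qs_append_conc]
  simp [quoteSuffix]
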